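-- pv_equiv track=rewrite | github.com/MetanoicArmor/I2PChat | i2pchat/sam/protocol.py | _redact_sam_reply
-- ===== SOURCE A (Python) =====
-- SENSITIVE_SAM_KEYS = {"PRIV", "PRIVATE", "DESTINATION", "SIGNING_PRIVATE_KEY"}
--
-- def _redact_sam_reply(raw_reply: str) -> str:
--     if not raw_reply:
--         return ""
--     redacted_parts = []
--     for token in raw_reply.split(" "):
--         if "=" not in token:
--             redacted_parts.append(token)
--             continue
--         key, value = token.split("=", 1)
--         if key in SENSITIVE_SAM_KEYS and value:
--             redacted_parts.append(f"{key}=<redacted>")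
--         else:
--             redacted_parts.append(token)
--     return " ".join(redacted_parts)
-- ===== SOURCE B (Python) =====
-- _REDACTED_PREFIXES = ("PRIV=", "PRIVATE=", "DESTINATION=", "SIGNING_PRIVATE_KEY=")
--
--
-- def _redact_token(token: str) -> str:
--     for prefix in _REDACTED_PREFIXES:
--         if token.startswith(prefix) and len(token) > len(prefix):
--             return prefix + "<redacted>"
--     return token
--
--
-- def _redact_sam_reply(raw_reply: str) -> str:
--     if not raw_reply:
--         return ""
--     return " ".join(_redact_token(t) for t in raw_reply.split(" "))
-- ===== Notes on version B (the rewrite author's own statement) =====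
-- stated objective: idiomatic
-- what changed: B drops A's per-token equals-sign search, two-way split and sensitive-set membership test, instead matching each token once against a tuple of four whole key-plus-separator prefixes (first match wins), with a length check enforcing a non-empty value.
import Mathlib
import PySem

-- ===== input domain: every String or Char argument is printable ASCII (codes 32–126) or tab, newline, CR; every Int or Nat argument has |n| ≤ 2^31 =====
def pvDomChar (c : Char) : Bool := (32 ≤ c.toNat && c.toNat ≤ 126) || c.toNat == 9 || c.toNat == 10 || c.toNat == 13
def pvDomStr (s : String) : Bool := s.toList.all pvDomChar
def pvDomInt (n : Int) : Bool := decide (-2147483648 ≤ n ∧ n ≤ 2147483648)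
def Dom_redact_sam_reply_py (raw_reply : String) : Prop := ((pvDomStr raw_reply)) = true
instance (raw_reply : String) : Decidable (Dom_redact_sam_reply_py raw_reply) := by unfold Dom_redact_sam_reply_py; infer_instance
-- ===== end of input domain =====

-- B replaces A's per-token '=' search / split("=",1) / set-membership analysis by a first-match scan
-- over the four whole "KEY=" prefixes (idiomatic; same cost).

-- ===== PORT A =====
-- SENSITIVE_SAM_KEYS = {"PRIV", "PRIVATE", "DESTINATION", "SIGNING_PRIVATE_KEY"}  (a Python set)
def pvSensitiveKeys : List (List Char) :=
  PySem.Set.ofList ["PRIV".toList, "PRIVATE".toList, "DESTINATION".toList, "SIGNING_PRIVATE_KEY".toList]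

def redact_sam_reply_py (raw_reply : String) : String :=
  if raw_reply.toList = [] then ""
  else
    let parts := (PySem.Chars.splitOn raw_reply.toList [' ']).foldl (fun acc token =>
      if PySem.Chars.isIn ['='] token = false then acc ++ [token]
      else
        match PySem.Chars.splitOnMax token ['='] 1 with
        | [key, value] =>
            if pvSensitiveKeys.contains key && !value.isEmpty then
              acc ++ [key ++ "=<redacted>".toList]
            else acc ++ [token]
        | _ => acc ++ [token]) []
    String.ofList (PySem.Chars.join [' '] parts)

-- ===== PORT B =====
def pvRedactPrefixes : List (List Char) :=
  ["PRIV=".toList, "PRIVATE=".toList, "DESTINATION=".toList, "SIGNING_PRIVATE_KEY=".toList]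

def pvRedactToken : List (List Char) → List Char → List Char
  | [], token => token
  | p :: ps, token =>
    if PySem.Chars.startswith token p && decide (p.length < token.length) then p ++ "<redacted>".toList
    else pvRedactToken ps token

def redact_sam_reply_py_alt (raw_reply : String) : String :=
  if raw_reply.toList = [] then ""
  else
    String.ofList (PySem.Chars.join [' ']
      ((PySem.Chars.splitOn raw_reply.toList [' ']).map (pvRedactToken pvRedactPrefixes)))

-- ===== PRECONDITION & SPEC =====
def Spec_redact_sam_reply_py (raw_reply : String) (out : String) : Prop := out = redact_sam_reply_py_alt raw_reply
instance (raw_reply : String) (out : String) : Decidable (Spec_redact_sam_reply_py raw_reply out) := by unfold Spec_redact_sam_reply_py; infer_instance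

-- ===== CLAIM (what is proved, stated in full; the proofs are below) =====
def Claim_equal_redact_sam_reply_py : Prop := ∀ (raw_reply : String), Dom_redact_sam_reply_py raw_reply → Spec_redact_sam_reply_py raw_reply (redact_sam_reply_py raw_reply)

-- ===== LEMMAS AND PROOFS =====

-- A's per-token computation, factored out of its loop body.
def pvTokA (token : List Char) : List Char :=
  if PySem.Chars.isIn ['='] token = false then token
  else
    match PySem.Chars.splitOnMax token ['='] 1 with
    | [key, value] =>
        if pvSensitiveKeys.contains key && !value.isEmpty then key ++ "=<redacted>".toList
        else token
    | _ => token

theorem pvGo0 (sep : List Char) (fuel : Nat) (l cur : List Char) (acc : List (List Char)) :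
    PySem.Chars.splitOnMax.go sep fuel 0 l cur acc = acc.reverse ++ [cur.reverse ++ l] := by
  cases fuel with
  | zero => simp [PySem.Chars.splitOnMax.go]
  | succ n => cases l <;> simp [PySem.Chars.splitOnMax.go]

theorem pvGo1 (fuel : Nat) (t cur : List Char) (acc : List (List Char)) (h : t.length < fuel) :
    PySem.Chars.splitOnMax.go ['='] fuel 1 t cur acc =
      if '=' ∈ t then
        acc.reverse ++ [cur.reverse ++ t.takeWhile (· ≠ '='), (t.dropWhile (· ≠ '=')).tail]
      else acc.reverse ++ [cur.reverse ++ t] := by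
  induction fuel generalizing t cur acc with
  | zero => omega
  | succ n ih =>
    cases t with
    | nil => simp [PySem.Chars.splitOnMax.go]
    | cons c rest =>
      by_cases hc : c = '='
      · subst hc
        simp [PySem.Chars.splitOnMax.go, List.isPrefixOf, pvGo0, List.takeWhile, List.dropWhile]
      · have : rest.length < n := by simpa using Nat.lt_of_succ_lt_succ h
        simp only [PySem.Chars.splitOnMax.go, List.isPrefixOf]
        rw [if_neg (by simp [Ne.symm hc])]
        rw [ih rest (c :: cur) acc this]
        by_cases hm : '=' ∈ rest <;> simp [hm, hc, Ne.symm hc]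

theorem pvSplitEq (t : List Char) :
    PySem.Chars.splitOnMax t ['='] 1 =
      if '=' ∈ t then [t.takeWhile (· ≠ '='), (t.dropWhile (· ≠ '=')).tail] else [t] := by
  unfold PySem.Chars.splitOnMax
  rw [if_neg (by norm_num)]
  have h1 : (1 : Int).toNat = 1 := rfl
  rw [h1, pvGo1 (t.length + 1) t [] [] (by omega)]
  split <;> simp

theorem pvPrefixIff (key t : List Char) (hk : '=' ∉ key) :
    (key ++ ['=']).isPrefixOf t = true ↔
      (t.takeWhile (· ≠ '=') = key ∧ t.dropWhile (· ≠ '=') ≠ []) := by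
  induction key generalizing t with
  | nil =>
    cases t with
    | nil => simp [List.isPrefixOf]
    | cons c r =>
      by_cases hc : c = '='
      · subst hc; simp [List.isPrefixOf]
      · simp [List.isPrefixOf, hc, Ne.symm hc]
  | cons a ks ih =>
    have ha : a ≠ '=' := fun h => hk (by simp [h])
    have hks : '=' ∉ ks := fun h => hk (by simp [h])
    cases t with
    | nil => simp [List.isPrefixOf]
    | cons c r =>
      by_cases hce : c = '='
      · subst hce
        simp [List.isPrefixOf, ha, Ne.symm ha]
      · by_cases hc : c = a
        · subst hc
          simp [List.isPrefixOf, hce, ih r hks]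
        · simp [List.isPrefixOf, hce, hc]
          exact fun h => absurd h.symm hc

theorem pvHeadDrop (e : Char) (v l : List Char) (h : l.dropWhile (· ≠ '=') = e :: v) : e = '=' := by
  have hne : l.dropWhile (fun x => decide (x ≠ '=')) ≠ [] := by rw [h]; simp
  have h2 := List.head_dropWhile_not (fun x => decide (x ≠ '=')) hne
  have h3 : (l.dropWhile (fun x => decide (x ≠ '='))).head? = some e := by rw [h]; rfl
  rw [List.head?_eq_some_head hne] at h3
  rw [Option.some_inj.mp h3] at h2
  simpa using h2

theorem pvCond (key t : List Char) (hk : '=' ∉ key) :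
    (PySem.Chars.startswith t (key ++ ['=']) && decide ((key ++ ['=']).length < t.length))
      = (decide (t.takeWhile (· ≠ '=') = key) && !((t.dropWhile (· ≠ '=')).tail.isEmpty)) := by
  have hsw : PySem.Chars.startswith t (key ++ ['=']) = (key ++ ['=']).isPrefixOf t := rfl
  by_cases hp : t.takeWhile (· ≠ '=') = key
  · rcases hd : t.dropWhile (· ≠ '=') with _ | ⟨e, v⟩
    · have hf : (key ++ ['=']).isPrefixOf t = false := by
        rw [Bool.eq_false_iff, Ne, pvPrefixIff key t hk, not_and]
        exact fun _ hcon => hcon hd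
      simp [hsw, hf, hd]
    · have he : e = '=' := pvHeadDrop e v t hd
      subst he
      have ht : t = key ++ '=' :: v := by
        conv_lhs => rw [← List.takeWhile_append_dropWhile (p := (· ≠ '=')) (l := t)]
        rw [hp, hd]
      have htr : (key ++ ['=']).isPrefixOf t = true := by
        rw [pvPrefixIff key t hk]
        exact ⟨hp, by rw [hd]; simp⟩
      rw [hsw, htr]
      have hlen : t.length = key.length + 1 + v.length := by rw [ht]; simp; omega
      simp only [ne_eq, decide_not] at hp
      rcases v with _ | ⟨x, xs⟩
      · simp [hp, hd, hlen]
      · simp [hp, hd, hlen]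
  · have hf : (key ++ ['=']).isPrefixOf t = false := by
      rw [Bool.eq_false_iff, Ne, pvPrefixIff key t hk, not_and]
      intro h
      exact absurd h hp
    simp only [ne_eq, decide_not] at hp
    simp [hsw, hf, hp]

theorem pvMemIff (t : List Char) : PySem.Chars.isIn ['='] t = true ↔ '=' ∈ t := by
  rw [PySem.Chars.isIn_iff_infix]
  constructor
  · intro h; exact h.subset (by simp)
  · intro h
    obtain ⟨s1, s2, rfl⟩ := List.append_of_mem h
    exact ⟨s1, s2, by simp⟩

theorem pvTokEq (t : List Char) : pvTokA t = pvRedactToken pvRedactPrefixes t := by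
  have e1 : "PRIV=".toList = "PRIV".toList ++ ['='] := by decide
  have e2 : "PRIVATE=".toList = "PRIVATE".toList ++ ['='] := by decide
  have e3 : "DESTINATION=".toList = "DESTINATION".toList ++ ['='] := by decide
  have e4 : "SIGNING_PRIVATE_KEY=".toList = "SIGNING_PRIVATE_KEY".toList ++ ['='] := by decide
  have n1 : '=' ∉ "PRIV".toList := by decide
  have n2 : '=' ∉ "PRIVATE".toList := by decide
  have n3 : '=' ∉ "DESTINATION".toList := by decide
  have n4 : '=' ∉ "SIGNING_PRIVATE_KEY".toList := by decide
  unfold pvTokA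
  simp only [pvRedactToken, pvRedactPrefixes]
  rw [e1, e2, e3, e4, pvCond _ _ n1, pvCond _ _ n2, pvCond _ _ n3, pvCond _ _ n4]
  by_cases hm : '=' ∈ t
  · rw [if_neg (by simp [(pvMemIff t).mpr hm])]
    rw [pvSplitEq, if_pos hm]
    by_cases hv : (t.dropWhile (· ≠ '=')).tail.isEmpty = true
    all_goals simp only [ne_eq, decide_not, List.isEmpty_iff] at hv
    · simp [hv, pvSensitiveKeys]
    · by_cases h1 : List.takeWhile (fun x => !decide (x = '=')) t = ['P','R','I','V']
      · simp [h1, hv, pvSensitiveKeys]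
      · by_cases h2 : List.takeWhile (fun x => !decide (x = '=')) t = ['P','R','I','V','A','T','E']
        · simp [h1, h2, hv, pvSensitiveKeys]
        · by_cases h3 : List.takeWhile (fun x => !decide (x = '=')) t = ['D','E','S','T','I','N','A','T','I','O','N']
          · simp [h1, h2, h3, hv, pvSensitiveKeys]
          · by_cases h4 : List.takeWhile (fun x => !decide (x = '=')) t = ['S','I','G','N','I','N','G','_','P','R','I','V','A','T','E','_','K','E','Y']
            · simp [h1, h2, h3, h4, hv, pvSensitiveKeys]
            · simp [h1, h2, h3, h4, hv, pvSensitiveKeys]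
  · rw [if_pos (Bool.eq_false_iff.mpr (fun h => hm ((pvMemIff t).mp h)))]
    have hd : t.dropWhile (· ≠ '=') = [] :=
      List.dropWhile_eq_nil_iff.mpr (fun x hx => by
        simp only [ne_eq, decide_eq_true_eq]
        exact fun he => hm (he ▸ hx))
    simp only [ne_eq, decide_not] at hd
    simp [hd]

-- ===== VERDICT (by name: the statement is the Claim_ definition above) =====
theorem redact_sam_reply_py_spec : Claim_equal_redact_sam_reply_py := by
  intro raw _
  unfold Spec_redact_sam_reply_py redact_sam_reply_py redact_sam_reply_py_alt
  by_cases h : raw.toList = []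
  · simp [h]
  · simp only [h]
    have hstep : (fun (acc : List (List Char)) token =>
        if PySem.Chars.isIn ['='] token = false then acc ++ [token]
        else
          match PySem.Chars.splitOnMax token ['='] 1 with
          | [key, value] =>
              if pvSensitiveKeys.contains key && !value.isEmpty then
                acc ++ [key ++ "=<redacted>".toList]
              else acc ++ [token]
          | _ => acc ++ [token]) = fun acc token => acc ++ [pvTokA token] := by
      funext acc token
      unfold pvTokA
      by_cases hi : PySem.Chars.isIn ['='] token = false
      · simp [hi]
      · simp only [hi, if_neg, Bool.not_eq_false]
        rcases hsp : PySem.Chars.splitOnMax token ['='] 1 with _ | ⟨k, _ | ⟨v, _ | _⟩⟩ <;>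
          simp <;> split <;> simp
    rw [hstep, PySem.List.foldl_append_singleton_eq_map, List.nil_append]
    have hmap : List.map pvTokA = List.map (pvRedactToken pvRedactPrefixes) := by
      funext l; exact List.map_congr_left (fun x _ => pvTokEq x)
    rw [hmap]
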